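-- pv_equiv track=rewrite | github.com/LightPotatoDev/baekjoon | simulation/cowCrane.py | cow_crane
-- ===== SOURCE A (Python) =====
-- def cow_crane(pos,m_ok,l_ok):
--     t = 0
--     tm,tl = 0,0
--
--     for i in range(len(pos)-1):
--         d = abs(pos[i+1]-pos[i])
--         t += d
--         if i == m_ok:
--             tm = t
--         if i == l_ok:
--             tl = t
--
--     return (tm,tl)
-- ===== SOURCE B (Python) =====
-- def cow_crane(pos, m_ok, l_ok):
--     # Each checkpoint is answered independently: sum the absolute gaps of the
--     # prefix slice pos[:k+2] from scratch. No shared running accumulator, no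
--     # cumulative table - two stateless slice sums instead of one fused pass.
--     def total_upto(k):
--         if not (0 <= k <= len(pos) - 2):
--             return 0
--         seg = pos[:k + 2]
--         return sum(abs(y - x) for x, y in zip(seg, seg[1:]))
--     return (total_upto(m_ok), total_upto(l_ok))
-- ===== Notes on version B (the rewrite author's own statement) =====
-- stated objective: alternative
-- what changed: replaces A's single fused loop carrying a running total with inline checkpoint tests by two independent, stateless slice sums: each answer is computed from scratch as sum(abs diffs) over the prefix slice pos[:k+2], with a range guard returning 0
import Mathlib
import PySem

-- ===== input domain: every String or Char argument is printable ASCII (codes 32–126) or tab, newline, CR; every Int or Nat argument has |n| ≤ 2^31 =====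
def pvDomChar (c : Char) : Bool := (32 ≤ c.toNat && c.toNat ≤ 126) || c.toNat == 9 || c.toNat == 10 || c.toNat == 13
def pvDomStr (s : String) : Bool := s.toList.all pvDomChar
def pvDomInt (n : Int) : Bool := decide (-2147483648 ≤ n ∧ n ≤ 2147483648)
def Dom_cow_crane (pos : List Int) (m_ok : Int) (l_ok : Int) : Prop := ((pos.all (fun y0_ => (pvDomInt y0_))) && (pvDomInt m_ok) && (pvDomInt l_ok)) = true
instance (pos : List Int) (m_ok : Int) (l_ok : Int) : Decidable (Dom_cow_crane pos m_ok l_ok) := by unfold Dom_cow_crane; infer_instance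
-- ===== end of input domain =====

-- B answers each checkpoint independently by a stateless sum over the prefix slice
-- pos[:k+2], instead of A's fused running-total loop with inline checkpoint tests
-- (alternative decomposition, same cost).

-- ===== PORT A =====
-- A's single loop over i in range(len(pos)-1), carrying (t, tm, tl).
def cow_crane (pos : List Int) (m_ok : Int) (l_ok : Int) : Int × Int :=
  let step := fun (st : Int × Int × Int) (i : Nat) =>
    let d := |pos.getD (i + 1) 0 - pos.getD i 0|   -- indices i, i+1 are in range for every i < len(pos)-1
    let t := st.1 + d
    let tm := if (i : Int) = m_ok then t else st.2.1
    let tl := if (i : Int) = l_ok then t else st.2.2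
    (t, tm, tl)
  let r := (List.range (pos.length - 1)).foldl step (0, 0, 0)
  (r.2.1, r.2.2)

-- ===== PORT B =====
-- total_upto(k): range guard, then a from-scratch sum of |y - x| over the slice
-- pos[:k+2] zipped with its own tail (k ≥ 0 inside the guard, so pos[:k+2] = take).
def cowCraneTotalUpto (pos : List Int) (k : Int) : Int :=
  if 0 ≤ k ∧ k ≤ (pos.length : Int) - 2 then
    let seg := pos.take (k.toNat + 2)
    ((seg.zip seg.tail).map (fun p => |p.2 - p.1|)).sum
  else 0

def cow_crane_alt (pos : List Int) (m_ok : Int) (l_ok : Int) : Int × Int :=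
  (cowCraneTotalUpto pos m_ok, cowCraneTotalUpto pos l_ok)

-- ===== PRECONDITION & SPEC =====
def Spec_cow_crane (pos : List Int) (m_ok : Int) (l_ok : Int) (out : Int × Int) : Prop := out = cow_crane_alt pos m_ok l_ok
instance (pos : List Int) (m_ok : Int) (l_ok : Int) (out : Int × Int) : Decidable (Spec_cow_crane pos m_ok l_ok out) := by unfold Spec_cow_crane; infer_instance

-- ===== CLAIM (what is proved, stated in full; the proofs are below) =====
def Claim_equal_cow_crane : Prop := ∀ (pos : List Int) (m_ok : Int) (l_ok : Int), Dom_cow_crane pos m_ok l_ok → Spec_cow_crane pos m_ok l_ok (cow_crane pos m_ok l_ok)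

-- ===== LEMMAS AND PROOFS =====

theorem diffs_length (pos : List Int) :
    ((pos.zip pos.tail).map (fun p => |p.2 - p.1|)).length = pos.length - 1 := by
  simp [List.length_zip, List.length_tail]

theorem diffs_getD (pos : List Int) (i : Nat) (hi : i < pos.length - 1) :
    ((pos.zip pos.tail).map (fun p => |p.2 - p.1|)).getD i 0
      = |pos.getD (i + 1) 0 - pos.getD i 0| := by
  have hlen : i < ((pos.zip pos.tail).map (fun p => |p.2 - p.1|)).length := by
    rw [diffs_length]; exact hi
  have h1 : i < pos.length := by omega
  have h2 : i + 1 < pos.length := by omega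
  have ht : i < pos.tail.length := by simp [List.length_tail]; omega
  rw [List.getD_eq_getElem _ _ hlen, List.getD_eq_getElem pos 0 h2, List.getD_eq_getElem pos 0 h1]
  simp [List.getElem_zip, List.getElem_tail]

-- The adjacent-difference list of a prefix is the prefix of the adjacent-difference list.
theorem zip_tail_take (pos : List Int) (n : Nat) :
    ((pos.take n).zip (pos.take n).tail) = (pos.zip pos.tail).take (n - 1) := by
  induction pos generalizing n with
  | nil => simp
  | cons a l ih =>
    cases n with
    | zero => simp
    | succ n =>
      cases l with
      | nil => simp
      | cons b l' =>
        cases n with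
        | zero => simp
        | succ n =>
          simp only [List.take_succ_cons, List.tail_cons, List.zip_cons_cons,
            Nat.add_sub_cancel]
          congr 1
          simpa using ih (n + 1)

-- Invariant of A's loop after the first k iterations.
theorem loopA (pos : List Int) (m_ok l_ok : Int) (k : Nat) (hk : k ≤ pos.length - 1) :
    (List.range k).foldl
      (fun (st : Int × Int × Int) (i : Nat) =>
        let d := |pos.getD (i + 1) 0 - pos.getD i 0|
        let t := st.1 + d
        let tm := if (i : Int) = m_ok then t else st.2.1
        let tl := if (i : Int) = l_ok then t else st.2.2
        (t, tm, tl)) (0, 0, 0)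
      = (let D := (pos.zip pos.tail).map (fun p => |p.2 - p.1|)
         (((D.take k).sum : Int),
          (if 0 ≤ m_ok ∧ m_ok < (k : Int) then (D.take (m_ok.toNat + 1)).sum else 0),
          (if 0 ≤ l_ok ∧ l_ok < (k : Int) then (D.take (l_ok.toNat + 1)).sum else 0))) := by
  induction k with
  | zero =>
    simp only [List.range_zero, List.foldl_nil, List.take_zero, List.sum_nil]
    simp
  | succ k ih =>
    rw [List.range_succ, List.foldl_append, ih (by omega)]
    simp only [List.foldl_cons, List.foldl_nil]
    set D := (pos.zip pos.tail).map (fun p => |p.2 - p.1|) with hD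
    have hkD : k < D.length := by rw [hD, diffs_length]; omega
    have hsum : (D.take k).sum + |pos.getD (k + 1) 0 - pos.getD k 0| = (D.take (k + 1)).sum := by
      rw [← diffs_getD pos k (by omega), ← hD,
        List.getD_eq_getElem _ _ hkD, List.sum_take_succ _ _ hkD]
    refine Prod.ext ?_ (Prod.ext ?_ ?_)
    · simpa using hsum
    · show (if (k : Int) = m_ok then _ else _) = _
      by_cases hm : (k : Int) = m_ok
      · have hkm : m_ok.toNat = k := by omega
        have h1 : 0 ≤ m_ok ∧ m_ok < ((k + 1 : Nat) : Int) := by push_cast; omega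
        rw [if_pos hm, if_pos h1, hkm]
        exact hsum
      · have hiff : (0 ≤ m_ok ∧ m_ok < ((k + 1 : Nat) : Int)) ↔ (0 ≤ m_ok ∧ m_ok < (k : Int)) := by
          push_cast; omega
        rw [if_neg hm, if_congr hiff rfl rfl]
    · show (if (k : Int) = l_ok then _ else _) = _
      by_cases hl : (k : Int) = l_ok
      · have hkl : l_ok.toNat = k := by omega
        have h1 : 0 ≤ l_ok ∧ l_ok < ((k + 1 : Nat) : Int) := by push_cast; omega
        rw [if_pos hl, if_pos h1, hkl]
        exact hsum
      · have hiff : (0 ≤ l_ok ∧ l_ok < ((k + 1 : Nat) : Int)) ↔ (0 ≤ l_ok ∧ l_ok < (k : Int)) := by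
          push_cast; omega
        rw [if_neg hl, if_congr hiff rfl rfl]

-- B's per-checkpoint slice sum equals A's checkpoint value.
theorem totalUpto_eq (pos : List Int) (k : Int) :
    cowCraneTotalUpto pos k
      = (if 0 ≤ k ∧ k < ((pos.length - 1 : Nat) : Int) then
          ((((pos.zip pos.tail).map (fun p => |p.2 - p.1|)).take (k.toNat + 1)).sum : Int)
         else 0) := by
  have hiff : (0 ≤ k ∧ k ≤ (pos.length : Int) - 2) ↔ (0 ≤ k ∧ k < ((pos.length - 1 : Nat) : Int)) := by
    omega
  unfold cowCraneTotalUpto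
  rw [if_congr hiff rfl rfl]
  split_ifs with h
  · have h2 : k.toNat + 2 - 1 = k.toNat + 1 := by omega
    simp only [zip_tail_take pos (k.toNat + 2), h2, List.map_take]
  · rfl

-- ===== VERDICT (by name: the statement is the Claim_ definition above) =====
theorem cow_crane_spec : Claim_equal_cow_crane := by
  intro pos m_ok l_ok _
  show cow_crane pos m_ok l_ok = cow_crane_alt pos m_ok l_ok
  simp only [cow_crane, cow_crane_alt]
  rw [loopA pos m_ok l_ok (pos.length - 1) le_rfl, totalUpto_eq, totalUpto_eq]
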